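-- pv_equiv track=rewrite | github.com/2023-ssafy-study/Problem-Solving | wonkyoung/BOJ/Gold 4/13422_도둑.py | cnt_cases
-- ===== SOURCE A (Python) =====
-- def cnt_cases(N, M, K, finance):
--     if N == M:
--         return 1 if sum(finance) < K else 0
--
--     finance += finance[:M-1]
--     stolen = cnt = 0
--     for i in range(M-1):
--         stolen += finance[i]
--
--     end = M-1
--     for start in range(N):
--         stolen += finance[end]
--         if stolen < K:
--             cnt += 1
--         stolen -= finance[start]
--         end += 1
--
--     return cnt
-- ===== SOURCE B (Python) =====
-- def cnt_cases(N, M, K, finance):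
--     if N == M:
--         return 1 if sum(finance) < K else 0
--
--     finance += finance[:M-1]
--     P = [0]
--     acc = 0
--     for x in finance:
--         acc += x
--         P.append(acc)
--
--     cnt = 0
--     for start in range(N):
--         if P[start + M] - P[start] < K:
--             cnt += 1
--     return cnt
-- ===== Notes on version B (the rewrite author's own statement) =====
-- stated objective: alternative
-- what changed: B replaces A's running sliding-window accumulator (add the new element, test, subtract the old) with a prefix-sum table over the extended list and computes each window sum as one subtraction P[start+M]-P[start].
-- outside the precondition, e.g. on cnt_cases(2, 0, 3, [5, 9]): A returns 0, B returns 2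
import Mathlib
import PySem

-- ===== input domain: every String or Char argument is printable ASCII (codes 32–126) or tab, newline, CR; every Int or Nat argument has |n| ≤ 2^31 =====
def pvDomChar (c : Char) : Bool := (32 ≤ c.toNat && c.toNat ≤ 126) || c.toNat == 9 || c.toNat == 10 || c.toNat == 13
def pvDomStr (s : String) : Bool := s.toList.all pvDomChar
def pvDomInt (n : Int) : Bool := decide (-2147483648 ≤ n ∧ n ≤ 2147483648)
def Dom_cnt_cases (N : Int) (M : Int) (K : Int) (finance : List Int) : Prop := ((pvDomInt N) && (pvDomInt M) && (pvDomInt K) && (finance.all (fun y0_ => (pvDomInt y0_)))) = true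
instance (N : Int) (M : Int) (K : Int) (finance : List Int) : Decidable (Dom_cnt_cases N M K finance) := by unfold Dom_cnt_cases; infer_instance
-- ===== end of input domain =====

-- B replaces A's running sliding-window accumulator with a prefix-sum table (one subtraction
-- per window); same cost, different decomposition. Both A and B mutate `finance` identically
-- (`finance += finance[:M-1]`); the equivalence proved here is about the return value.

-- ===== PORT A =====
def cnt_cases (N : Int) (M : Int) (K : Int) (finance : List Int) : Int :=
  if N = M then (if finance.sum < K then 1 else 0)
  else
    let fin2 := finance ++ PySem.List.slice finance none (some (M - 1))
    let stolen0 := (PySem.List.pyRange 0 (M - 1) 1).foldl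
      (fun s i => s + PySem.List.pyGetD fin2 i 0) 0
    let st := (PySem.List.pyRange 0 N 1).foldl
      (fun (st : Int × Int × Int) start =>
        let stolen := st.1 + PySem.List.pyGetD fin2 st.2.2 0
        (stolen - PySem.List.pyGetD fin2 start 0,
         (if stolen < K then st.2.1 + 1 else st.2.1),
         st.2.2 + 1))
      (stolen0, 0, M - 1)
    st.2.1

-- ===== PORT B =====
def cnt_cases_alt (N : Int) (M : Int) (K : Int) (finance : List Int) : Int :=
  if N = M then (if finance.sum < K then 1 else 0)
  else
    let fin2 := finance ++ PySem.List.slice finance none (some (M - 1))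
    let pa := fin2.foldl
      (fun (pa : List Int × Int) x => (pa.1 ++ [pa.2 + x], pa.2 + x)) ([0], 0)
    (PySem.List.pyRange 0 N 1).foldl
      (fun cnt start =>
        if PySem.List.pyGetD pa.1 (start + M) 0 - PySem.List.pyGetD pa.1 start 0 < K
        then cnt + 1 else cnt)
      0


-- ===== PRECONDITION & SPEC =====
-- Pre_ admits the N == M case, every input whose second loop is empty (N ≤ 0, provided the
-- first loop does not raise IndexError), and every input with 0 ≤ N and 1 ≤ M on which
-- all of A's list indices stay inside the extended list (whose length is
-- len(finance) + min(M-1, len(finance))); it excludes inputs on which A raises IndexError,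
-- and inputs (M ≤ 0 or too-large N/M, with N > 0) on which A returns a value only via
-- Python's accidental negative-index wraparound.
def Pre_cnt_cases (N : Int) (M : Int) (K : Int) (finance : List Int) : Prop :=
  N = M ∨ (N ≤ 0 ∧ M ≤ 2 * (finance.length : Int) + 1)
    ∨ (0 ≤ N ∧ 1 ≤ M
        ∧ M - 1 ≤ (finance.length : Int) + min (M - 1) (finance.length : Int)
        ∧ N + M - 1 ≤ (finance.length : Int) + min (M - 1) (finance.length : Int))
instance (N : Int) (M : Int) (K : Int) (finance : List Int) : Decidable (Pre_cnt_cases N M K finance) := by unfold Pre_cnt_cases; infer_instance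

def pvWitness_cnt_cases : Int × Int × Int × List Int := (4, 2, 10, [1, 2, 3, 4])

def Spec_cnt_cases (N : Int) (M : Int) (K : Int) (finance : List Int) (out : Int) : Prop := out = cnt_cases_alt N M K finance
instance (N : Int) (M : Int) (K : Int) (finance : List Int) (out : Int) : Decidable (Spec_cnt_cases N M K finance out) := by unfold Spec_cnt_cases; infer_instance

-- ===== CLAIM (what is proved, stated in full; the proofs are below) =====
def Claim_equal_cnt_cases : Prop := ∀ (N : Int) (M : Int) (K : Int) (finance : List Int), Dom_cnt_cases N M K finance → Pre_cnt_cases N M K finance → Spec_cnt_cases N M K finance (cnt_cases N M K finance)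

-- ===== LEMMAS AND PROOFS =====

theorem pv_prefix_fold (xs : List Int) :
    xs.foldl (fun (pa : List Int × Int) x => (pa.1 ++ [pa.2 + x], pa.2 + x)) ([0], 0)
      = ((List.range (xs.length + 1)).map (fun i => (xs.take i).sum), xs.sum) := by
  induction xs using List.reverseRecOn with
  | nil => simp [List.range_succ]
  | append_singleton ys y ih =>
    rw [List.foldl_append, ih]
    simp only [List.foldl_cons, List.foldl_nil, Prod.mk.injEq]
    refine ⟨?_, by simp⟩
    rw [List.length_append, List.length_singleton, List.range_succ (n := ys.length + 1),
      List.map_append]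
    congr 1
    · apply List.map_congr_left
      intro a ha
      rw [List.mem_range] at ha
      rw [List.take_append_of_le_length (by omega)]
    · simp

theorem pv_stolen0_fold (ext : List Int) (j : Nat) (hj : j ≤ ext.length) :
    (PySem.List.pyRange 0 (j : Int) 1).foldl
        (fun s i => s + PySem.List.pyGetD ext i 0) 0
      = (ext.take j).sum := by
  induction j with
  | zero => simp
  | succ j ih =>
    rw [show ((j + 1 : Nat) : Int) = (j : Int) + 1 by push_cast; ring,
      PySem.List.pyRange_one_succ_right (by positivity), List.foldl_append,
      ih (by omega)]
    simp only [List.foldl_cons, List.foldl_nil, PySem.List.pyGetD_natCast]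
    rw [List.getD_eq_getElem ext 0 (by omega),
      List.sum_take_succ (p := by omega)]

theorem pv_main_loop (ext : List Int) (K : Int) (m : Nat) (hm : 1 ≤ m) (L : Nat)
    (hlen : ext.length = L + (m - 1)) (n : Nat) (hn : n ≤ L) :
    (PySem.List.pyRange 0 (n : Int) 1).foldl
        (fun (st : Int × Int × Int) start =>
          (st.1 + PySem.List.pyGetD ext st.2.2 0 - PySem.List.pyGetD ext start 0,
           (if st.1 + PySem.List.pyGetD ext st.2.2 0 < K then st.2.1 + 1 else st.2.1),
           st.2.2 + 1))
        ((ext.take (m - 1)).sum, 0, ((m - 1 : Nat) : Int))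
      = ((ext.take (n + m - 1)).sum - (ext.take n).sum,
         (PySem.List.pyRange 0 (n : Int) 1).foldl
           (fun cnt start =>
             if PySem.List.pyGetD ((List.range (ext.length + 1)).map (fun i => (ext.take i).sum)) (start + (m : Int)) 0
                  - PySem.List.pyGetD ((List.range (ext.length + 1)).map (fun i => (ext.take i).sum)) start 0 < K
             then cnt + 1 else cnt)
           0,
         ((n + m - 1 : Nat) : Int)) := by
  induction n with
  | zero => simp
  | succ n ih =>
    have key : ∀ j : Nat, j + 1 ≤ ext.length →
        (ext.take (j + 1)).sum = (ext.take j).sum + ext.getD j 0 := by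
      intro j hj
      rw [List.getD_eq_getElem ext 0 (by omega)]
      exact List.sum_take_succ (p := by omega)
    have e1 := key (n + m - 1) (by omega)
    rw [show n + m - 1 + 1 = n + m by omega] at e1
    have e2 := key n (by omega)
    rw [show ((n + 1 : Nat) : Int) = (n : Int) + 1 by push_cast; ring,
      PySem.List.pyRange_one_succ_right (by positivity), List.foldl_append, List.foldl_append,
      ih (by omega)]
    simp only [List.foldl_cons, List.foldl_nil,
      show (n : Int) + (m : Int) = ((n + m : Nat) : Int) by push_cast; ring,
      PySem.List.pyGetD_natCast]
    have hB1 : ((List.range (ext.length + 1)).map (fun i => (ext.take i).sum)).getD (n + m) 0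
        = (ext.take (n + m)).sum := by
      rw [List.getD_eq_getElem _ 0 (by simp; omega)]
      simp
    have hB2 : ((List.range (ext.length + 1)).map (fun i => (ext.take i).sum)).getD n 0
        = (ext.take n).sum := by
      rw [List.getD_eq_getElem _ 0 (by simp; omega)]
      simp
    simp only [Prod.mk.injEq]
    refine ⟨?_, ?_, by omega⟩
    · rw [show n + 1 + m - 1 = n + m by omega, e1, e2]
      ring
    · have hc : (ext.take (n + m - 1)).sum - (ext.take n).sum + ext.getD (n + m - 1) 0
          = ((List.range (ext.length + 1)).map (fun i => (ext.take i).sum)).getD (n + m) 0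
            - ((List.range (ext.length + 1)).map (fun i => (ext.take i).sum)).getD n 0 := by
        rw [hB1, hB2, e1]; ring
      rw [hc]

theorem pv_equiv (N : Int) (M : Int) (K : Int) (finance : List Int)
    (hpre : N = M ∨ (N ≤ 0 ∧ M ≤ 2 * (finance.length : Int) + 1)
      ∨ (0 ≤ N ∧ 1 ≤ M
          ∧ M - 1 ≤ (finance.length : Int) + min (M - 1) (finance.length : Int)
          ∧ N + M - 1 ≤ (finance.length : Int) + min (M - 1) (finance.length : Int))) :
    cnt_cases N M K finance = cnt_cases_alt N M K finance := by
  by_cases hNM : N = M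
  · simp [cnt_cases, cnt_cases_alt, hNM]
  · rcases hpre.resolve_left hNM with ⟨hN0, _⟩ | ⟨hN0, hNL, hM1, hML⟩
    · -- second loop empty: both return 0
      simp [cnt_cases, cnt_cases_alt, if_neg hNM, PySem.List.pyRange_one_eq_nil hN0]
    · obtain ⟨m, rfl⟩ : ∃ m : Nat, M = (m : Int) := ⟨M.toNat, by omega⟩
      obtain ⟨n, rfl⟩ : ∃ n : Nat, N = (n : Int) := ⟨N.toNat, by omega⟩
      have hm1 : 1 ≤ m := by omega
      have hEa : m - 1 ≤ finance.length + min (m - 1) finance.length := by omega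
      have hEb : n + (m - 1) ≤ finance.length + min (m - 1) finance.length := by omega
      simp only [cnt_cases, cnt_cases_alt, if_neg hNM]
      simp only [show ((m : Int)) - 1 = ((m - 1 : Nat) : Int) by omega,
        PySem.List.slice_to_natCast, pv_prefix_fold]
      have hlen : (finance ++ finance.take (m - 1)).length
          = (finance.length + min (m - 1) finance.length - (m - 1)) + (m - 1) := by
        simp; omega
      rw [pv_stolen0_fold _ _ (by rw [hlen]; omega)]
      have main := pv_main_loop (finance ++ finance.take (m - 1)) K m hm1
        (finance.length + min (m - 1) finance.length - (m - 1)) hlen n (by omega)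
      simp only [hlen] at main ⊢
      rw [main]

-- ===== VERDICT (by name: the statement is the Claim_ definition above) =====
theorem cnt_cases_spec : Claim_equal_cnt_cases := by
  intro N M K finance _ hpre
  exact pv_equiv N M K finance hpre
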